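-- pv_equiv track=rewrite | github.com/havryleshko/system-design | apps/backend/app/agent/system_design/nodes.py | _map_tool_to_catalog
-- ===== SOURCE A (Python) =====
-- from typing import Any, Dict, Optional, Sequence
--
-- def _map_tool_to_catalog(tool_name: str, tool_type: str, catalog: dict) -> Optional[str]:
--     """Map a legacy tool name to a catalog tool ID."""
--     catalog_tools = catalog.get("tools", [])
--     tool_name_lower = tool_name.lower()
--     tool_type_lower = tool_type.lower() if tool_type else ""
--
--     # Direct ID match
--     for ct in catalog_tools:
--         if ct.get("id", "").lower() == tool_name_lower:
--             return ct["id"]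
--
--     # Name match
--     for ct in catalog_tools:
--         if ct.get("display_name", "").lower() == tool_name_lower:
--             return ct["id"]
--
--     # Category-based mapping
--     category_map = {
--         "db": "db_storage",
--         "database": "db_storage",
--         "api": "deployment_hosting",
--         "llm": "orchestration",
--         "search": "vector_store",
--         "queue": "queue_workflow",
--         "auth": "auth_identity",
--     }
--
--     mapped_category = category_map.get(tool_type_lower)
--     if mapped_category:
--         for ct in catalog_tools:
--             if ct.get("category") == mapped_category:
--                 return ct["id"]
--
--     # Keyword-based mapping
--     keyword_map = {
--         "postgres": "postgres_supabase",
--         "supabase": "postgres_supabase",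
--         "redis": "redis_streams",
--         "queue": "sqs",
--         "vector": "pgvector",
--         "embedding": "pgvector",
--         "auth": "supabase_auth",
--         "login": "supabase_auth",
--         "deploy": "vercel",
--         "host": "vercel",
--         "monitor": "opentelemetry",
--         "trace": "langsmith",
--         "log": "opentelemetry",
--     }
--
--     for keyword, tool_id in keyword_map.items():
--         if keyword in tool_name_lower:
--             return tool_id
--
--     return None
-- ===== SOURCE B (Python) =====
-- from typing import Optional
--
-- def _map_tool_to_catalog(tool_name: str, tool_type: str, catalog: dict) -> Optional[str]:
--     """Single pass over the catalog: each tool gets a priority rank (0 = id match,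
--     1 = display_name match, 2 = mapped-category match) and the best-ranked first
--     occurrence wins; the keyword table is only consulted if nothing ranked."""
--     tools = catalog.get("tools", [])
--     tnl = tool_name.lower()
--     ttl = tool_type.lower() if tool_type else ""
--
--     category_map = {
--         "db": "db_storage",
--         "database": "db_storage",
--         "api": "deployment_hosting",
--         "llm": "orchestration",
--         "search": "vector_store",
--         "queue": "queue_workflow",
--         "auth": "auth_identity",
--     }
--     mapped = category_map.get(ttl)
--
--     best = None  # (rank, tool) with the smallest rank seen, first occurrence wins
--     for ct in tools:
--         if ct.get("id", "").lower() == tnl: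
--             best = (0, ct)
--             break  # rank 0 cannot be beaten
--         if ct.get("display_name", "").lower() == tnl:
--             r = 1
--         elif mapped is not None and ct.get("category") == mapped:
--             r = 2
--         else:
--             continue
--         if best is None or r < best[0]:
--             best = (r, ct)
--     if best is not None:
--         return best[1]["id"]
--
--     keyword_map = {
--         "postgres": "postgres_supabase",
--         "supabase": "postgres_supabase",
--         "redis": "redis_streams",
--         "queue": "sqs",
--         "vector": "pgvector",
--         "embedding": "pgvector",
--         "auth": "supabase_auth",
--         "login": "supabase_auth",
--         "deploy": "vercel",
--         "host": "vercel",
--         "monitor": "opentelemetry",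
--         "trace": "langsmith",
--         "log": "opentelemetry",
--     }
--     for kw, tid in keyword_map.items():
--         if kw in tnl:
--             return tid
--     return None
-- ===== Notes on version B (the rewrite author's own statement) =====
-- stated objective: alternative
-- what changed: A's three staged scans (id, then display_name, then category) become ONE pass over the catalog with a priority accumulator: each tool is ranked (0 id-match, 1 name-match, 2 mapped-category-match) and the lowest-ranked first occurrence is kept; the keyword stage runs only when no tool ranked.
import Mathlib
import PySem

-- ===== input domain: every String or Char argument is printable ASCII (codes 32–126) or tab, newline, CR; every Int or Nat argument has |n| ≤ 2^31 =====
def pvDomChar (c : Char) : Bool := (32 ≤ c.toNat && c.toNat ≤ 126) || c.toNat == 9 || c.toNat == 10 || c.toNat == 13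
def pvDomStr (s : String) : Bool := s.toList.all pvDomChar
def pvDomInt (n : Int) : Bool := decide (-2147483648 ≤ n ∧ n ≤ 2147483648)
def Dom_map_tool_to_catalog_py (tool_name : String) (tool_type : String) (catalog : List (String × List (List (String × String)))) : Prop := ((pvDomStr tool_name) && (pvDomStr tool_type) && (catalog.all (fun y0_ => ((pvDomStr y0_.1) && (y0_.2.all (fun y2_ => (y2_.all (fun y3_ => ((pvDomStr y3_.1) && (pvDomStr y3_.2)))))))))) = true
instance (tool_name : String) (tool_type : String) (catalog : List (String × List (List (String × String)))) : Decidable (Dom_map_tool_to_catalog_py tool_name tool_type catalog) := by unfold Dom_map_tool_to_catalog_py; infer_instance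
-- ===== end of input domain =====

-- B folds A's three staged scans into ONE pass with a priority accumulator (rank 0 id-match,
-- 1 name-match, 2 mapped-category-match; lowest rank, first occurrence wins); return values only.

-- ===== PORT A =====
-- shared literal data: the two literal dicts of the Python source (identical in A and B)
def pyCategoryMap : PySem.Dict String String := PySem.Dict.ofList
  [("db", "db_storage"), ("database", "db_storage"), ("api", "deployment_hosting"),
   ("llm", "orchestration"), ("search", "vector_store"), ("queue", "queue_workflow"),
   ("auth", "auth_identity")]
-- keyword_map.items() in insertion order (keys are distinct)
def pyKeywordItems : List (String × String) :=
  [("postgres", "postgres_supabase"), ("supabase", "postgres_supabase"), ("redis", "redis_streams"),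
   ("queue", "sqs"), ("vector", "pgvector"), ("embedding", "pgvector"), ("auth", "supabase_auth"),
   ("login", "supabase_auth"), ("deploy", "vercel"), ("host", "vercel"),
   ("monitor", "opentelemetry"), ("trace", "langsmith"), ("log", "opentelemetry")]

-- the three loop conditions (ct.get(...) with default / first-match dict lookup)
def pvP1 (tnl : String) (ct : List (String × String)) : Bool :=
  PySem.Str.lower ((PySem.Dict.mk ct).getD "id" "") == tnl
def pvP2 (tnl : String) (ct : List (String × String)) : Bool :=
  PySem.Str.lower ((PySem.Dict.mk ct).getD "display_name" "") == tnl
def pvP3 (m : String) (ct : List (String × String)) : Bool :=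
  (PySem.Dict.mk ct).get? "category" == some m

-- ct["id"] at a selected tool without "id" is a KeyError: outside Pre_, the ports return "" there
def pvGetId (ct : List (String × String)) : String := (PySem.Dict.mk ct).getD "id" ""

-- A's first loop: direct ID match
def pyFindId (tnl : String) : List (List (String × String)) → Option String
  | [] => none
  | ct :: rest => if pvP1 tnl ct then some (pvGetId ct) else pyFindId tnl rest

-- A's second loop: display_name match
def pyFindName (tnl : String) : List (List (String × String)) → Option String
  | [] => none
  | ct :: rest => if pvP2 tnl ct then some (pvGetId ct) else pyFindName tnl rest

-- A's category loop
def pyFindCat (m : String) : List (List (String × String)) → Option String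
  | [] => none
  | ct :: rest => if pvP3 m ct then some (pvGetId ct) else pyFindCat m rest

-- the keyword loop: `keyword in tool_name_lower` (identical code in A and B)
def pyKwScan (tnl : String) : List (String × String) → Option String
  | [] => none
  | (kw, tid) :: rest => if PySem.Str.isIn kw tnl then some tid else pyKwScan tnl rest

def map_tool_to_catalog_py (tool_name : String) (tool_type : String) (catalog : List (String × List (List (String × String)))) : Option String :=
  let tools := (PySem.Dict.mk catalog).getD "tools" []
  let tnl := PySem.Str.lower tool_name
  let ttl := if tool_type == "" then "" else PySem.Str.lower tool_type
  -- `if mapped_category:`: every pyCategoryMap value is a nonempty string, so truthy = present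
  match pyFindId tnl tools with
  | some v => some v
  | none =>
    match pyFindName tnl tools with
    | some v => some v
    | none =>
      match pyCategoryMap.get? ttl with
      | some m =>
        (match pyFindCat m tools with
         | some v => some v
         | none => pyKwScan tnl pyKeywordItems)
      | none => pyKwScan tnl pyKeywordItems

-- ===== PORT B =====
-- per-tool priority rank: some 0 = id match, some 1 = display_name match, some 2 = mapped-category match
def pvRank (tnl : String) (mc : Option String) (ct : List (String × String)) : Option Nat :=
  if pvP1 tnl ct then some 0
  else if pvP2 tnl ct then some 1
  else match mc with
    | some m => if pvP3 m ct then some 2 else none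
    | none => none

-- B's single loop: keep the lowest-ranked tool, first occurrence wins; rank 0 breaks
def pvBestScan (tnl : String) (mc : Option String) : List (List (String × String)) → Option (Nat × List (String × String)) → Option (List (String × String))
  | [], best => best.map (·.2)
  | ct :: rest, best =>
    match pvRank tnl mc ct with
    | some 0 => some ct
    | some r =>
      pvBestScan tnl mc rest
        (match best with
         | none => some (r, ct)
         | some (br, bct) => if r < br then some (r, ct) else some (br, bct))
    | none => pvBestScan tnl mc rest best

def map_tool_to_catalog_py_alt (tool_name : String) (tool_type : String) (catalog : List (String × List (List (String × String)))) : Option String :=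
  let tools := (PySem.Dict.mk catalog).getD "tools" []
  let tnl := PySem.Str.lower tool_name
  let ttl := if tool_type == "" then "" else PySem.Str.lower tool_type
  let mapped := pyCategoryMap.get? ttl
  match pvBestScan tnl mapped tools none with
  | some ct => some (pvGetId ct)
  | none => pyKwScan tnl pyKeywordItems

-- ===== PRECONDITION & SPEC =====
def pvHasId (ct : List (String × String)) : Bool := ((PySem.Dict.mk ct).get? "id").isSome

-- Pre_ excludes exactly the inputs on which the Python A raises KeyError (ct["id"]): the tool the
-- staged search selects (first id match; else first name match; else, if the category is mapped,
-- first category match) lacks an "id" key. Python B raises KeyError on exactly the same inputs.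
def Pre_map_tool_to_catalog_py (tool_name : String) (tool_type : String) (catalog : List (String × List (List (String × String)))) : Prop :=
  (let tools := (PySem.Dict.mk catalog).getD "tools" []
   let tnl := PySem.Str.lower tool_name
   let ttl := if tool_type == "" then "" else PySem.Str.lower tool_type
   match tools.find? (pvP1 tnl) with
   | some ct => pvHasId ct
   | none =>
     match tools.find? (pvP2 tnl) with
     | some ct => pvHasId ct
     | none =>
       match pyCategoryMap.get? ttl with
       | some m =>
         match tools.find? (pvP3 m) with
         | some ct => pvHasId ct
         | none => true
       | none => true) = true

instance (tool_name : String) (tool_type : String) (catalog : List (String × List (List (String × String)))) : Decidable (Pre_map_tool_to_catalog_py tool_name tool_type catalog) := by unfold Pre_map_tool_to_catalog_py; infer_instance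

def pvWitness_map_tool_to_catalog_py : String × String × (List (String × List (List (String × String)))) :=
  ("Postgres DB", "db", [("tools", [[("id", "postgres_supabase"), ("display_name", "Postgres"), ("category", "db_storage")]])])

def Spec_map_tool_to_catalog_py (tool_name : String) (tool_type : String) (catalog : List (String × List (List (String × String)))) (out : Option String) : Prop := out = map_tool_to_catalog_py_alt tool_name tool_type catalog
instance (tool_name : String) (tool_type : String) (catalog : List (String × List (List (String × String)))) (out : Option String) : Decidable (Spec_map_tool_to_catalog_py tool_name tool_type catalog out) := by unfold Spec_map_tool_to_catalog_py; infer_instance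

-- ===== CLAIM (what is proved, stated in full; the proofs are below) =====
def Claim_equal_map_tool_to_catalog_py : Prop := ∀ (tool_name : String) (tool_type : String) (catalog : List (String × List (List (String × String)))), Dom_map_tool_to_catalog_py tool_name tool_type catalog → Pre_map_tool_to_catalog_py tool_name tool_type catalog → Spec_map_tool_to_catalog_py tool_name tool_type catalog (map_tool_to_catalog_py tool_name tool_type catalog)

-- ===== LEMMAS AND PROOFS =====

-- the stage-3 candidate as a first-match search (f2 in the characterisation)
def pvF2 (mc : Option String) (tools : List (List (String × String))) : Option (List (String × String)) :=
  match mc with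
  | some m => tools.find? (pvP3 m)
  | none => none

-- what B's single pass computes: the staged first-match searches, in priority order
lemma pvBestScan_char (tnl : String) (mc : Option String) : ∀ (tools : List (List (String × String))),
    (pvBestScan tnl mc tools none
      = (tools.find? (pvP1 tnl)).or ((tools.find? (pvP2 tnl)).or (pvF2 mc tools))) ∧
    (∀ b, pvBestScan tnl mc tools (some (1, b)) = (tools.find? (pvP1 tnl)).or (some b)) ∧
    (∀ b, pvBestScan tnl mc tools (some (2, b))
      = (tools.find? (pvP1 tnl)).or ((tools.find? (pvP2 tnl)).or (some b))) := by
  intro tools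
  induction tools with
  | nil => exact ⟨by cases mc <;> rfl, fun b => rfl, fun b => rfl⟩
  | cons ct rest ih =>
    obtain ⟨ih0, ih1, ih2⟩ := ih
    by_cases h1 : pvP1 tnl ct
    · -- rank 0: break; every find? (pvP1) hits the head
      have hr : pvRank tnl mc ct = some 0 := by simp [pvRank, h1]
      have f1 : (ct :: rest).find? (pvP1 tnl) = some ct := List.find?_cons_of_pos h1
      refine ⟨?_, fun b => ?_, fun b => ?_⟩ <;> simp [pvBestScan, hr, f1]
    · have f1 : (ct :: rest).find? (pvP1 tnl) = rest.find? (pvP1 tnl) :=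
        List.find?_cons_of_neg h1
      by_cases h2 : pvP2 tnl ct
      · -- rank 1
        have hr : pvRank tnl mc ct = some 1 := by simp [pvRank, h1, h2]
        have f2 : (ct :: rest).find? (pvP2 tnl) = some ct := List.find?_cons_of_pos h2
        refine ⟨?_, fun b => ?_, fun b => ?_⟩ <;>
          simp [pvBestScan, hr, f1, f2, ih1]
      · have f2 : (ct :: rest).find? (pvP2 tnl) = rest.find? (pvP2 tnl) :=
          List.find?_cons_of_neg h2
        cases mc with
        | none =>
          have hr : pvRank tnl none ct = none := by simp [pvRank, h1, h2]
          refine ⟨?_, fun b => ?_, fun b => ?_⟩ <;>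
            simp [pvBestScan, hr, f1, f2, pvF2, ih0, ih1, ih2]
        | some m =>
          by_cases h3 : pvP3 m ct
          · -- rank 2
            have hr : pvRank tnl (some m) ct = some 2 := by simp [pvRank, h1, h2, h3]
            have f3 : (ct :: rest).find? (pvP3 m) = some ct := List.find?_cons_of_pos h3
            refine ⟨?_, fun b => ?_, fun b => ?_⟩ <;>
              simp [pvBestScan, hr, f1, f2, f3, pvF2, ih1, ih2]
          · have hr : pvRank tnl (some m) ct = none := by simp [pvRank, h1, h2, h3]
            have f3 : (ct :: rest).find? (pvP3 m) = rest.find? (pvP3 m) :=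
              List.find?_cons_of_neg h3
            refine ⟨?_, fun b => ?_, fun b => ?_⟩ <;>
              simp [pvBestScan, hr, f1, f2, f3, pvF2, ih0, ih1, ih2]

-- A's loops as first-match searches
lemma pyFindId_eq_map (k : String) : ∀ (tools : List (List (String × String))),
    pyFindId k tools = (tools.find? (pvP1 k)).map pvGetId := by
  intro tools
  induction tools with
  | nil => rfl
  | cons ct rest ih =>
    simp only [pyFindId]
    cases hp : pvP1 k ct with
    | true => rw [if_pos rfl, List.find?_cons_of_pos hp]; rfl
    | false => rw [if_neg (by simp), List.find?_cons_of_neg (by simp [hp]), ih]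

lemma pyFindName_eq_map (k : String) : ∀ (tools : List (List (String × String))),
    pyFindName k tools = (tools.find? (pvP2 k)).map pvGetId := by
  intro tools
  induction tools with
  | nil => rfl
  | cons ct rest ih =>
    simp only [pyFindName]
    cases hp : pvP2 k ct with
    | true => rw [if_pos rfl, List.find?_cons_of_pos hp]; rfl
    | false => rw [if_neg (by simp), List.find?_cons_of_neg (by simp [hp]), ih]

lemma pyFindCat_eq_map (m : String) : ∀ (tools : List (List (String × String))),
    pyFindCat m tools = (tools.find? (pvP3 m)).map pvGetId := by
  intro tools
  induction tools with
  | nil => rfl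
  | cons ct rest ih =>
    simp only [pyFindCat]
    cases hp : pvP3 m ct with
    | true => rw [if_pos rfl, List.find?_cons_of_pos hp]; rfl
    | false => rw [if_neg (by simp), List.find?_cons_of_neg (by simp [hp]), ih]

-- ===== VERDICT (by name: the statement is the Claim_ definition above) =====
theorem map_tool_to_catalog_py_spec : Claim_equal_map_tool_to_catalog_py := by
  intro tool_name tool_type catalog _ _
  unfold Spec_map_tool_to_catalog_py
  unfold map_tool_to_catalog_py map_tool_to_catalog_py_alt
  set tools := (PySem.Dict.mk catalog).getD "tools" [] with htools
  set tnl := PySem.Str.lower tool_name with htnl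
  set ttl := if tool_type == "" then "" else PySem.Str.lower tool_type with httl
  simp only
  rw [(pvBestScan_char tnl (pyCategoryMap.get? ttl) tools).1,
      pyFindId_eq_map, pyFindName_eq_map]
  cases hf1 : tools.find? (pvP1 tnl) with
  | some ct => simp [Option.or]
  | none =>
    simp only [Option.map_none, Option.none_or]
    cases hf2 : tools.find? (pvP2 tnl) with
    | some ct => simp [Option.or]
    | none =>
      simp only [Option.map_none, Option.none_or]
      cases hmc : pyCategoryMap.get? ttl with
      | none => simp [pvF2]
      | some m =>
        simp only [pvF2]
        rw [pyFindCat_eq_map]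
        cases hf3 : tools.find? (pvP3 m) <;> simp
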